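-- pv_equiv track=rewrite | github.com/mdev-lab-cyber/LogicalInference | model_checking.py | model_check
-- ===== SOURCE A (Python) =====
-- abold = {"AI" : True,
-- "Machine" : True
-- }
--
-- def model_check(fact, rules,visit,mabe):
--     if fact in abold and abold[fact] == True:
--         return True
--     if fact not in visit and fact in mabe:
--         visit.add(fact)
--         for facts in mabe[fact]:
--                  result = model_check(facts, rules,visit,mabe)
--                  if result == True:
--                      return True
--     return False
-- ===== SOURCE B (Python) =====
-- abold = {"AI" : True,
-- "Machine" : True
-- }
--
-- def model_check(fact, rules, visit, mabe):
--     stack = [fact]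
--     while stack:
--         f = stack.pop()
--         if f in abold and abold[f] == True:
--             return True
--         if f in visit or f not in mabe:
--             continue
--         visit.add(f)
--         stack.extend(reversed(mabe[f]))
--     return False
-- ===== Notes on version B (the rewrite author's own statement) =====
-- stated objective: alternative
-- what changed: The recursive preorder DFS with early return is replaced by an iterative DFS over an explicit stack (children pushed reversed so pop order matches the recursion), removing recursion entirely.
import Mathlib
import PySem

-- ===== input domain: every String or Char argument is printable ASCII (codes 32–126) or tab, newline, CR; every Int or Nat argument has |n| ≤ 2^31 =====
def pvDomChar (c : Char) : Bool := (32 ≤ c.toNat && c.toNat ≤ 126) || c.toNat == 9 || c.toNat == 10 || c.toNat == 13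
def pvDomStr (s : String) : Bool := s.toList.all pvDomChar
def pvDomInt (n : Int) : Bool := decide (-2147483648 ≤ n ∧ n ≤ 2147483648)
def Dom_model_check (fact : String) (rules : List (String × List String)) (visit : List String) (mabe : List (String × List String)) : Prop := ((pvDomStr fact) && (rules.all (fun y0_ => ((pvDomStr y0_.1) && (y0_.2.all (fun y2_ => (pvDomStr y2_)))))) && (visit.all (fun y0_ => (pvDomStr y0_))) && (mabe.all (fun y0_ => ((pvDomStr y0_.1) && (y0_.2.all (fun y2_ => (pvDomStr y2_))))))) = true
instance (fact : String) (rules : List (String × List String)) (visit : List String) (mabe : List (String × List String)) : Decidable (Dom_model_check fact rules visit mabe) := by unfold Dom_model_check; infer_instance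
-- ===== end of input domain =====

-- B replaces A's recursive preorder DFS by an iterative explicit-stack DFS (same cost; 'alternative').
-- Both Pythons mutate the argument set `visit` identically (same adds, same order); the equivalence
-- proved here is about the RETURN value.

-- the module constant `abold` (shared context of both Source A and Source B)
def pvAbold : PySem.Dict String Bool := ⟨[("AI", true), ("Machine", true)]⟩

-- helper lemmas cited by the ports' termination proofs (measure only, not behaviour)
-- `pvKeysLeft mabe visit` = number of occurrences of keys of `mabe` not yet in `visit`
def pvKeysLeft (mabe : List (String × List String)) (visit : List String) : Nat :=
  ((mabe.map Prod.fst).filter (fun k => !visit.contains k)).length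

theorem pvFilterLe {α : Type} (p q : α → Bool) (l : List α) (h : ∀ x, p x = true → q x = true) :
    (l.filter p).length ≤ (l.filter q).length := by
  induction l with
  | nil => simp
  | cons a l ih =>
    by_cases hp : p a = true
    · simp [List.filter_cons, hp, h a hp]; omega
    · simp only [List.filter_cons]
      rw [if_neg (by simp_all)]
      by_cases hq : q a = true <;> simp [hq] <;> omega

theorem pvFilterLt {α : Type} (p q : α → Bool) (l : List α) (h : ∀ x, p x = true → q x = true)
    (a : α) (ha : a ∈ l) (hq : q a = true) (hp : p a = false) :
    (l.filter p).length < (l.filter q).length := by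
  induction l with
  | nil => cases ha
  | cons x l ih =>
    rcases List.mem_cons.mp ha with rfl | hmem
    · simp only [List.filter_cons, hq, if_pos, hp]
      rw [if_neg (by simp [hp])]
      simp only [List.length_cons]
      exact Nat.lt_succ_of_le (pvFilterLe p q l h)
    · simp only [List.filter_cons]
      by_cases hx : p x = true
      · simp [hx, h x hx, Nat.succ_lt_succ (ih hmem)]
      · rw [if_neg (by simp_all)]
        by_cases hqx : q x = true
        · simp only [hqx, if_pos, List.length_cons]
          exact Nat.lt_succ_of_lt (ih hmem)
        · rw [if_neg (by simp_all)]; exact ih hmem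

theorem pvKeysLeft_lt (mabe : List (String × List String)) (visit : List String) (fact : String)
    (h1 : fact ∈ mabe.map Prod.fst) (h2 : visit.contains fact = false) :
    pvKeysLeft mabe (visit ++ [fact]) < pvKeysLeft mabe visit := by
  apply pvFilterLt _ _ _ _ fact h1 (by simpa using h2) (by simp)
  intro x hx
  simp only [List.contains_append, Bool.not_eq_true', Bool.or_eq_false_iff] at hx ⊢
  exact hx.1

-- ===== PORT A =====
-- Literal port of A's recursion, with a fuel parameter making the recursion structural
-- (none = fuel exhausted; pvRunA_isSome below proves fuel `mabe.length + 1` is never exhausted).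
mutual
def pvRunA (mabe : List (String × List String)) (fuel : Nat) (fact : String)
    (visit : List String) : Option (Bool × List String) :=
  match fuel with
  | 0 => none
  | fuel' + 1 =>
    -- if fact in abold and abold[fact] == True: return True
    if (PySem.Dict.get? pvAbold fact).getD false then some (true, visit)
    -- if fact not in visit and fact in mabe:
    else if !(PySem.Set.contains visit fact) && PySem.Dict.contains ⟨mabe⟩ fact then
      -- visit.add(fact); for facts in mabe[fact]: …
      pvLoopA mabe fuel' (PySem.Dict.getD ⟨mabe⟩ fact []) (PySem.Set.add visit fact)
    else some (false, visit)
  termination_by (fuel, 0)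
  decreasing_by apply Prod.Lex.left; omega

def pvLoopA (mabe : List (String × List String)) (fuel : Nat) (cs : List String)
    (visit : List String) : Option (Bool × List String) :=
  match cs with
  | [] => some (false, visit)       -- loop done without early return: return False
  | c :: cs' =>
    match pvRunA mabe fuel c visit with
    | none => none
    | some (true, v) => some (true, v)   -- if result == True: return True
    | some (false, v) => pvLoopA mabe fuel cs' v
  termination_by (fuel, cs.length)
  decreasing_by
    · apply Prod.Lex.right; simp
    · apply Prod.Lex.right; simp
end

def model_check (fact : String) (rules : List (String × List String)) (visit : List String)
    (mabe : List (String × List String)) : Bool :=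
  match pvRunA mabe (mabe.length + 1) fact visit with
  | some (b, _) => b
  | none => false   -- unreachable: fuel mabe.length+1 suffices (pvRunA_isSome)

-- ===== PORT B =====
-- Source B's while-loop over an explicit stack. The Lean stack list is the REVERSE of the Python
-- list (head = top), so Python's `stack.extend(reversed(mabe[f]))` becomes prepending
-- `mabe[f] ++ rest`, and `stack.pop()` is taking the head.
def pvStepB (mabe : List (String × List String)) (stack : List String)
    (visit : List String) : Bool :=
  match stack with
  | [] => false                      -- while loop ended: return False
  | f :: rest =>                     -- f = stack.pop()
    if (PySem.Dict.get? pvAbold f).getD false then true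
    else if h2 : (PySem.Set.contains visit f || !PySem.Dict.contains ⟨mabe⟩ f) = true then
      pvStepB mabe rest visit        -- continue
    else
      pvStepB mabe (PySem.Dict.getD ⟨mabe⟩ f [] ++ rest) (PySem.Set.add visit f)
  termination_by (pvKeysLeft mabe visit, stack.length)
  decreasing_by
    · apply Prod.Lex.right; simp
    · apply Prod.Lex.left
      simp only [Bool.or_eq_true, Bool.not_eq_true', not_or, Bool.not_eq_true] at h2
      obtain ⟨hv, hm⟩ := h2
      rw [PySem.Set.add_of_not_mem (by simpa using hv)]
      apply pvKeysLeft_lt mabe visit f _ hv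
      have := (PySem.Dict.contains_iff_mem_keys (d := (⟨mabe⟩ : PySem.Dict String (List String))) (k := f)).mp (by simpa using hm)
      simpa [PySem.Dict.keys] using this

def model_check_alt (fact : String) (rules : List (String × List String)) (visit : List String)
    (mabe : List (String × List String)) : Bool :=
  pvStepB mabe [fact] visit          -- stack = [fact]; while stack: …

-- ===== PRECONDITION & SPEC =====
def Spec_model_check (fact : String) (rules : List (String × List String)) (visit : List String) (mabe : List (String × List String)) (out : Bool) : Prop := out = model_check_alt fact rules visit mabe
instance (fact : String) (rules : List (String × List String)) (visit : List String) (mabe : List (String × List String)) (out : Bool) : Decidable (Spec_model_check fact rules visit mabe out) := by unfold Spec_model_check; infer_instance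

-- ===== CLAIM (what is proved, stated in full; the proofs are below) =====
def Claim_equal_model_check : Prop := ∀ (fact : String) (rules : List (String × List String)) (visit : List String) (mabe : List (String × List String)), Dom_model_check fact rules visit mabe → Spec_model_check fact rules visit mabe (model_check fact rules visit mabe)

-- ===== LEMMAS AND PROOFS =====

theorem pvKeysLeft_le (mabe : List (String × List String)) (visit v : List String)
    (h : ∀ x, visit.contains x = true → v.contains x = true) :
    pvKeysLeft mabe v ≤ pvKeysLeft mabe visit := by
  apply pvFilterLe
  intro x hx
  simp only [Bool.not_eq_true'] at hx ⊢
  cases hvx : visit.contains x with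
  | false => rfl
  | true => rw [h x hvx] at hx; cases hx


-- the visited set only grows under A's recursion
theorem pvContainsAdd (s : List String) (x f : String) (h : s.contains x = true) :
    (PySem.Set.add s f).contains x = true := by
  rw [PySem.Set.add_eq_ite]
  split_ifs with hm
  · exact h
  · simp at h ⊢; exact Or.inl h

theorem pvMono (mabe : List (String × List String)) : ∀ fuel : Nat,
    (∀ f visit b v, pvRunA mabe fuel f visit = some (b, v) →
      ∀ x, visit.contains x = true → v.contains x = true)
    ∧ (∀ cs visit b v, pvLoopA mabe fuel cs visit = some (b, v) →
      ∀ x, visit.contains x = true → v.contains x = true) := by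
  intro fuel
  induction fuel with
  | zero =>
    constructor
    · intro f visit b v h; simp [pvRunA] at h
    · intro cs visit b v h x hx
      cases cs with
      | nil => simp [pvLoopA] at h; rw [← h.2]; exact hx
      | cons c cs' => simp [pvLoopA, pvRunA] at h
  | succ fuel ih =>
    have hrun : ∀ f visit b v, pvRunA mabe (fuel + 1) f visit = some (b, v) →
        ∀ x, visit.contains x = true → v.contains x = true := by
      intro f visit b v h x hx
      simp only [pvRunA] at h
      by_cases h1 : ((PySem.Dict.get? pvAbold f).getD false) = true
      · rw [if_pos h1] at h
        simp only [Option.some.injEq, Prod.mk.injEq] at h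
        rw [← h.2]; exact hx
      · rw [if_neg h1] at h
        by_cases h2 : (!(PySem.Set.contains visit f) && PySem.Dict.contains ⟨mabe⟩ f) = true
        · rw [if_pos h2] at h
          exact ih.2 _ _ _ _ h x (pvContainsAdd visit x f hx)
        · rw [if_neg h2] at h
          simp only [Option.some.injEq, Prod.mk.injEq] at h
          rw [← h.2]; exact hx
    refine ⟨hrun, ?_⟩
    intro cs
    induction cs with
    | nil =>
      intro visit b v h x hx
      simp [pvLoopA] at h; rw [← h.2]; exact hx
    | cons c cs' ihc =>
      intro visit b v h x hx
      simp only [pvLoopA] at h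
      cases hr : pvRunA mabe (fuel + 1) c visit with
      | none => rw [hr] at h; simp at h
      | some r =>
        obtain ⟨b1, v1⟩ := r
        rw [hr] at h
        cases b1 with
        | true =>
          simp only [Option.some.injEq, Prod.mk.injEq] at h
          have := hrun c visit true v1 hr x hx
          rw [← h.2]; exact this
        | false =>
          exact ihc v1 b v h x (hrun c visit false v1 hr x hx)


-- fuel strictly above `pvKeysLeft` never runs out
theorem pvSuff (mabe : List (String × List String)) : ∀ fuel : Nat,
    (∀ f visit, pvKeysLeft mabe visit < fuel → (pvRunA mabe fuel f visit).isSome)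
    ∧ (∀ cs visit, pvKeysLeft mabe visit < fuel → (pvLoopA mabe fuel cs visit).isSome) := by
  intro fuel
  induction fuel with
  | zero => exact ⟨fun f visit h => absurd h (by omega), fun cs visit h => absurd h (by omega)⟩
  | succ fuel ih =>
    have hrun : ∀ f visit, pvKeysLeft mabe visit < fuel + 1 → (pvRunA mabe (fuel + 1) f visit).isSome := by
      intro f visit hlt
      simp only [pvRunA]
      by_cases h1 : ((PySem.Dict.get? pvAbold f).getD false) = true
      · rw [if_pos h1]; rfl
      · rw [if_neg h1]
        by_cases h2 : (!(PySem.Set.contains visit f) && PySem.Dict.contains ⟨mabe⟩ f) = true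
        · rw [if_pos h2]
          apply ih.2
          simp only [Bool.and_eq_true, Bool.not_eq_true'] at h2
          obtain ⟨hv, hm⟩ := h2
          have hv' : visit.contains f = false := by simpa using hv
          have hkey : f ∈ mabe.map Prod.fst := by
            have := (PySem.Dict.contains_iff_mem_keys
              (d := (⟨mabe⟩ : PySem.Dict String (List String))) (k := f)).mp hm
            simpa [PySem.Dict.keys] using this
          rw [PySem.Set.add_of_not_mem (by simpa using hv')]
          have := pvKeysLeft_lt mabe visit f hkey hv'
          omega
        · rw [if_neg h2]; rfl
    refine ⟨hrun, ?_⟩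
    intro cs
    induction cs with
    | nil => intro visit _; simp [pvLoopA]
    | cons c cs' ihc =>
      intro visit hlt
      simp only [pvLoopA]
      cases hr : pvRunA mabe (fuel + 1) c visit with
      | none =>
        have := hrun c visit hlt
        rw [hr] at this; cases this
      | some r =>
        obtain ⟨b1, v1⟩ := r
        cases b1 with
        | true => rfl
        | false =>
          apply ihc
          have hle : pvKeysLeft mabe v1 ≤ pvKeysLeft mabe visit :=
            pvKeysLeft_le mabe visit v1 ((pvMono mabe (fuel + 1)).1 c visit false v1 hr)
          omega


-- simulation: B's stack loop processes the pending recursive calls of A in the same order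
theorem pvSim (mabe : List (String × List String)) : ∀ fuel : Nat,
    (∀ f visit b v rest, pvRunA mabe fuel f visit = some (b, v) →
      pvStepB mabe (f :: rest) visit = (if b then true else pvStepB mabe rest v))
    ∧ (∀ cs visit b v rest, pvLoopA mabe fuel cs visit = some (b, v) →
      pvStepB mabe (cs ++ rest) visit = (if b then true else pvStepB mabe rest v)) := by
  intro fuel
  induction fuel with
  | zero =>
    constructor
    · intro f visit b v rest h; simp [pvRunA] at h
    · intro cs visit b v rest h
      cases cs with
      | nil =>
        simp [pvLoopA] at h
        obtain ⟨rfl, rfl⟩ := h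
        simp
      | cons c cs' => simp [pvLoopA, pvRunA] at h
  | succ fuel ih =>
    have hrun : ∀ f visit b v rest, pvRunA mabe (fuel + 1) f visit = some (b, v) →
        pvStepB mabe (f :: rest) visit = (if b then true else pvStepB mabe rest v) := by
      intro f visit b v rest h
      simp only [pvRunA] at h
      simp only [pvStepB]
      by_cases h1 : ((PySem.Dict.get? pvAbold f).getD false) = true
      · rw [if_pos h1] at h
        simp only [Option.some.injEq, Prod.mk.injEq] at h
        rw [if_pos h1, ← h.1]
        simp
      · rw [if_neg h1] at h
        rw [if_neg h1]
        by_cases h2 : (!(PySem.Set.contains visit f) && PySem.Dict.contains ⟨mabe⟩ f) = true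
        · rw [if_pos h2] at h
          simp only [Bool.and_eq_true, Bool.not_eq_true'] at h2
          rw [dif_neg (by rw [h2.1, h2.2]; simp)]
          exact ih.2 _ _ _ _ _ h
        · rw [if_neg h2] at h
          simp only [Option.some.injEq, Prod.mk.injEq] at h
          rw [dif_pos (by
            cases ha : PySem.Set.contains visit f with
            | true => simp
            | false =>
              cases hb : PySem.Dict.contains (⟨mabe⟩ : PySem.Dict String (List String)) f with
              | false => simp
              | true => exact absurd (by rw [ha, hb]; simp) h2)]
          obtain ⟨rfl, rfl⟩ := h
          simp
    refine ⟨hrun, ?_⟩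
    intro cs
    induction cs with
    | nil =>
      intro visit b v rest h
      simp [pvLoopA] at h
      obtain ⟨rfl, rfl⟩ := h
      simp
    | cons c cs' ihc =>
      intro visit b v rest h
      simp only [pvLoopA] at h
      cases hr : pvRunA mabe (fuel + 1) c visit with
      | none => rw [hr] at h; simp at h
      | some r =>
        obtain ⟨b1, v1⟩ := r
        rw [hr] at h
        have hb := hrun c visit b1 v1 (cs' ++ rest) hr
        cases b1 with
        | true =>
          simp only [Option.some.injEq, Prod.mk.injEq] at h
          rw [List.cons_append, hb, ← h.1]
          simp
        | false =>
          rw [List.cons_append, hb]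
          simp only [if_neg (by simp : ¬(false = true))]
          exact ihc v1 b v rest h


-- ===== VERDICT (by name: the statement is the Claim_ definition above) =====
theorem model_check_spec : Claim_equal_model_check := by
  intro fact rules visit mabe _
  unfold Spec_model_check model_check model_check_alt
  have hfuel : pvKeysLeft mabe visit < mabe.length + 1 := by
    have := List.length_filter_le (fun k => !visit.contains k) (mabe.map Prod.fst)
    simp only [pvKeysLeft]
    simp at this ⊢
    omega
  have hs := (pvSuff mabe (mabe.length + 1)).1 fact visit hfuel
  cases hr : pvRunA mabe (mabe.length + 1) fact visit with
  | none => rw [hr] at hs; cases hs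
  | some r =>
    obtain ⟨b, v⟩ := r
    have := (pvSim mabe (mabe.length + 1)).1 fact visit b v [] hr
    rw [this]
    cases b
    · simp [pvStepB]
    · simp
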